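-- pv_equiv track=rewrite | github.com/lukeprofits/Monero_Subscriptions_Wallet | src/utils.py | valid_address
-- ===== SOURCE A (Python) =====
-- def valid_address(address, primary = True):
--     # Check if the wallet address is exactly 95 or 106 characters long
--     if len(address) not in [95, 106]:
--         return False
--
--     # Check if the wallet address starts with the number 4
--
--     if primary and address[0] != "4":
--         return False
--
--     # Check if the wallet address contains only valid characters
--     valid_chars = "123456789ABCDEFGHJKLMNPQRSTUVWXYZabcdefghijkmnopqrstuvwxyz"
--     for char in address:
--         if char not in valid_chars:
--             return False
--
--     # If it passed all these checks
--     return True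
-- ===== SOURCE B (Python) =====
-- import re
--
-- _CH = r"[123456789ABCDEFGHJKLMNPQRSTUVWXYZabcdefghijkmnopqrstuvwxyz]"
-- _PRIMARY_RE = re.compile(r"4%s{94}\Z|4%s{105}\Z" % (_CH, _CH))
-- _ANY_RE = re.compile(r"%s{95}\Z|%s{106}\Z" % (_CH, _CH))
--
-- def valid_address(address, primary=True):
--     pattern = _PRIMARY_RE if primary else _ANY_RE
--     return bool(pattern.fullmatch(address))
-- ===== Notes on version B (the rewrite author's own statement) =====
-- stated objective: idiomatic
-- what changed: Replaces the explicit length check, prefix check and character-scan loop with a single precompiled regular expression matched by re.fullmatch.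
import Mathlib
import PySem

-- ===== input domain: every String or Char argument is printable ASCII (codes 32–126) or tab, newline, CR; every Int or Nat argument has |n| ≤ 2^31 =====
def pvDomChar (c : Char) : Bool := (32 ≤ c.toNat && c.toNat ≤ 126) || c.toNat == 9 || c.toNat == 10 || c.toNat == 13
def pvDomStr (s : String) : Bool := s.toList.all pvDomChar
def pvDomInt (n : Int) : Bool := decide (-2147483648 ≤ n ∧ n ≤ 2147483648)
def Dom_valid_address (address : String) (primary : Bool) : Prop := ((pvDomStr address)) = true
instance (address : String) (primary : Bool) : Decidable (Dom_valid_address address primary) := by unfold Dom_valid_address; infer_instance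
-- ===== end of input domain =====

-- B replaces A's explicit length / prefix / per-character loop with one precompiled
-- regular-expression fullmatch (ported here as the automaton for that fixed pattern).

-- ===== PORT A =====
-- valid_chars = "123456789ABCDEFGHJKLMNPQRSTUVWXYZabcdefghijkmnopqrstuvwxyz"
def pvValidChars : List Char := "123456789ABCDEFGHJKLMNPQRSTUVWXYZabcdefghijkmnopqrstuvwxyz".toList

-- 'for char in address: if char not in valid_chars: return False' (single-char membership)
def pvALoop : List Char → Bool
  | [] => true
  | c :: rest => if pvValidChars.contains c = false then false else pvALoop rest

def valid_address (address : String) (primary : Bool) : Bool :=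
  -- if len(address) not in [95, 106]: return False
  if ([(95 : Int), 106].contains (PySem.Str.len address)) = false then false
  -- if primary and address[0] != "4": return False   (index 0 in range: length is 95 or 106)
  else if primary && !(PySem.Str.pyGet? address 0 == some '4') then false
  else pvALoop address.toList

-- ===== PORT B =====
-- pattern.fullmatch for the fixed pattern 'CH{n}\Z' tail: consume exactly n class chars
def pvMatchRun : List Char → Nat → Option (List Char)
  | cs, 0 => some cs
  | [], _ + 1 => none
  | c :: cs, n + 1 => if pvValidChars.contains c then pvMatchRun cs n else none

-- one alternation branch: optional literal '4', then CH{n}, then \Z (nothing left)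
def pvBranch (cs : List Char) (lead4 : Bool) (n : Nat) : Bool :=
  match (if lead4 then (match cs with | '4' :: t => some t | _ => none) else some cs) with
  | none => false
  | some t => match pvMatchRun t n with
              | some [] => true
              | _ => false

def valid_address_alt (address : String) (primary : Bool) : Bool :=
  let cs := address.toList
  if primary then pvBranch cs true 94 || pvBranch cs true 105
  else pvBranch cs false 95 || pvBranch cs false 106

-- ===== PRECONDITION & SPEC =====
def Spec_valid_address (address : String) (primary : Bool) (out : Bool) : Prop := out = valid_address_alt address primary
instance (address : String) (primary : Bool) (out : Bool) : Decidable (Spec_valid_address address primary out) := by unfold Spec_valid_address; infer_instance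

-- ===== CLAIM (what is proved, stated in full; the proofs are below) =====
def Claim_equal_valid_address : Prop := ∀ (address : String) (primary : Bool), Dom_valid_address address primary → Spec_valid_address address primary (valid_address address primary)

-- ===== LEMMAS AND PROOFS =====
theorem pvALoop_eq_all (cs : List Char) : pvALoop cs = cs.all (fun c => pvValidChars.contains c) := by
  induction cs with
  | nil => rfl
  | cons c rest ih =>
    by_cases h : c ∈ pvValidChars <;> simp [pvALoop, h, ih]

theorem pvMatchExact_eq (cs : List Char) (n : Nat) :
    (match pvMatchRun cs n with | some [] => true | _ => false)
      = (decide (cs.length = n) && cs.all (fun c => pvValidChars.contains c)) := by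
  induction cs generalizing n with
  | nil => cases n <;> simp [pvMatchRun]
  | cons c rest ih =>
    cases n with
    | zero => simp [pvMatchRun]
    | succ m =>
      by_cases h : c ∈ pvValidChars <;>
        simp [pvMatchRun, h, ih m]

theorem pvBranch_eq (cs : List Char) (lead4 : Bool) (n : Nat) :
    pvBranch cs lead4 n
      = (if lead4 then
           (match cs with
            | '4' :: t => decide (t.length = n) && t.all (fun c => pvValidChars.contains c)
            | _ => false)
         else decide (cs.length = n) && cs.all (fun c => pvValidChars.contains c)) := by
  cases lead4 with
  | false => simpa [pvBranch] using pvMatchExact_eq cs n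
  | true =>
    cases cs with
    | nil => rfl
    | cons c t =>
      by_cases h : c = '4'
      · subst h; simpa [pvBranch] using pvMatchExact_eq t n
      · have hm : (match c :: t with | '4' :: t => some t | _ => (none : Option (List Char))) = none := by
          split
          · next heq => injection heq with h1 _; exact absurd h1 h
          · rfl
        simp [pvBranch, hm]
        split
        · next heq => injection heq with h1 _; exact absurd h1 h
        · rfl

theorem pv_key (cs : List Char) (primary : Bool) :
    (if ([(95 : Int), 106].contains ((cs.length : Int))) = false then false
     else if primary && !(cs[0]? == some '4') then false
     else pvALoop cs)
      = (if primary then pvBranch cs true 94 || pvBranch cs true 105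
         else pvBranch cs false 95 || pvBranch cs false 106) := by
  have h95 : ((cs.length : Int) = 95) ↔ cs.length = 95 := by omega
  have h106 : ((cs.length : Int) = 106) ↔ cs.length = 106 := by omega
  cases cs with
  | nil =>
    cases primary <;> simp [pvBranch_eq, pvALoop_eq_all]
  | cons c rest =>
    by_cases hl95 : rest.length + 1 = 95 <;> by_cases hl106 : rest.length + 1 = 106
    · omega
    all_goals cases primary with
    | false =>
      simp_all [pvBranch_eq, pvALoop_eq_all]
    | true =>
      by_cases h4 : c = '4'
      · subst h4
        simp_all [pvBranch_eq, pvALoop_eq_all, pvValidChars]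
      · simp_all [pvBranch_eq]

-- ===== VERDICT (by name: the statement is the Claim_ definition above) =====
theorem valid_address_spec : Claim_equal_valid_address := by
  intro address primary _
  unfold Spec_valid_address valid_address valid_address_alt
  have h1 : PySem.Str.len address = ((address.toList.length : Nat) : Int) := by
    simp [PySem.Str.len_eq]
  have h2 : PySem.Str.pyGet? address 0 = address.toList[0]? := by
    simp [PySem.Str.pyGet?, PySem.List.pyGet?_zero]
  rw [h1, h2]
  exact pv_key address.toList primary
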